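-- pv_equiv track=rewrite | github.com/pythonzz0622/programmers | code/롤케이크자르기.py | solution
-- ===== SOURCE A (Python) =====
-- def solution(topping):
--     passed1 , passed2 = set() , set()
--     check1 , check2 = [] , []
--     for each in topping:
--         passed1.add(each)
--         check1.append(len(passed1))
--     for each in topping[::-1]:
--         passed2.add(each)
--         check2.append(len(passed2))
--
--     check2 = check2[::-1]
--     return sum(1 for index in range(len(check1) - 1) if check1[index] == check2[index + 1 ])
-- ===== SOURCE B (Python) =====
-- def solution(topping):
--     right = {}
--     for x in topping:
--         right[x] = right.get(x, 0) + 1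
--     left = set()
--     ans = 0
--     remaining = len(topping)
--     for x in topping:
--         remaining -= 1
--         left.add(x)
--         c = right[x] - 1
--         if c == 0:
--             del right[x]
--         else:
--             right[x] = c
--         if remaining > 0 and len(left) == len(right):
--             ans += 1
--     return ans
-- ===== Notes on version B (the rewrite author's own statement) =====
-- stated objective: alternative
-- what changed: A builds two full prefix/suffix distinct-count arrays (the second over the reversed list) and then scans index pairs; B makes a single forward pass that maintains a live frequency dict of the not-yet-seen right half (deleting keys that reach count 0) and a growing set of the left half, counting positions where the two sizes match.
import Mathlib
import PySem

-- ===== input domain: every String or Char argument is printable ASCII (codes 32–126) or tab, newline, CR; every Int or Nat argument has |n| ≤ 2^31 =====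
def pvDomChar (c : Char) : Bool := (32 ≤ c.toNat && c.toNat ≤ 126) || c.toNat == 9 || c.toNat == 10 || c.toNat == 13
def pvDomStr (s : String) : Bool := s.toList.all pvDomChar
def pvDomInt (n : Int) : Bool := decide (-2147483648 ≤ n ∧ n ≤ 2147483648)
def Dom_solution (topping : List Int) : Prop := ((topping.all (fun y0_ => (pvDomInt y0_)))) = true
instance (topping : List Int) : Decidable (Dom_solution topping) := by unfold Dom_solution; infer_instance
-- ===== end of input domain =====

-- B replaces A's two precomputed prefix/suffix distinct-count arrays by a single pass that keeps a
-- live frequency dict of the right half and a growing set of the left half (objective: alternative).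

-- ===== PORT A =====
def solution (topping : List Int) : Int :=
  let p1 := topping.foldl
    (fun (st : PySem.Set Int × List Int) each =>
      let s := PySem.Set.add st.1 each
      (s, st.2 ++ [PySem.Set.len s]))
    ((PySem.Set.empty : PySem.Set Int), [])
  let check1 := p1.2
  let p2 := ((PySem.List.slice? topping none none (-1)).getD []).foldl
    (fun (st : PySem.Set Int × List Int) each =>
      let s := PySem.Set.add st.1 each
      (s, st.2 ++ [PySem.Set.len s]))
    ((PySem.Set.empty : PySem.Set Int), [])
  let check2 := (PySem.List.slice? p2.2 none none (-1)).getD []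
  (PySem.List.pyRange 0 ((check1.length : Int) - 1) 1).foldl
    (fun acc index =>
      if PySem.List.pyGetD check1 index 0 = PySem.List.pyGetD check2 (index + 1) 0
      then acc + 1 else acc) 0

-- ===== PORT B =====
def solution_alt (topping : List Int) : Int :=
  let right := topping.foldl
    (fun (d : PySem.Dict Int Int) x => d.insert x (d.getD x 0 + 1)) PySem.Dict.empty
  let st := topping.foldl
    (fun (st : PySem.Set Int × PySem.Dict Int Int × Int × Int) x =>
      let rem := st.2.2.2 - 1
      let left := PySem.Set.add st.1 x
      let c := st.2.1.getD x 0 - 1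
      let right := if c = 0 then st.2.1.erase x else st.2.1.insert x c
      let ans := if 0 < rem ∧ PySem.Set.len left = (right.size : Int) then st.2.2.1 + 1 else st.2.2.1
      (left, right, ans, rem))
    ((PySem.Set.empty : PySem.Set Int), right, (0 : Int), (topping.length : Int))
  st.2.2.1

-- ===== PRECONDITION & SPEC =====
def Spec_solution (topping : List Int) (out : Int) : Prop := out = solution_alt topping
instance (topping : List Int) (out : Int) : Decidable (Spec_solution topping out) := by unfold Spec_solution; infer_instance

-- ===== CLAIM (what is proved, stated in full; the proofs are below) =====
def Claim_equal_solution : Prop := ∀ (topping : List Int), Dom_solution topping → Spec_solution topping (solution topping)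

-- ===== LEMMAS AND PROOFS =====

-- A's prefix-scan loop, characterised: the produced list holds the distinct-count of every prefix.
theorem loopA (xs : List Int) (s : PySem.Set Int) (l : List Int) :
    xs.foldl
      (fun (st : PySem.Set Int × List Int) each =>
        let s := PySem.Set.add st.1 each
        (s, st.2 ++ [PySem.Set.len s])) (s, l)
    = (xs.foldl PySem.Set.add s,
       l ++ (List.range xs.length).map
         (fun i => (((xs.take (i+1)).foldl PySem.Set.add s).length : Int))) := by
  induction xs generalizing s l with
  | nil => simp
  | cons x xs ih =>
    simp only [List.foldl_cons, List.length_cons, List.range_succ_eq_map]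
    rw [ih]
    simp [PySem.Set.len, List.map_map, Function.comp_def]

theorem card_ofList (xs : List Int) :
    (PySem.Set.ofList xs).length = xs.toFinset.card := by
  have h1 : (PySem.Set.ofList xs).toFinset = xs.toFinset := by
    ext a; simp [List.mem_toFinset, PySem.Set.mem_ofList]
  rw [← List.toFinset_card_of_nodup (PySem.Set.nodup_ofList xs), h1]

theorem card_foldl_add (xs : List Int) :
    ((xs.foldl PySem.Set.add (PySem.Set.empty : PySem.Set Int)).length : Int)
      = (xs.toFinset.card : Int) := by
  rw [show (xs.foldl PySem.Set.add (PySem.Set.empty : PySem.Set Int)) = PySem.Set.ofList xs from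
      (PySem.Set.ofList_eq_foldl xs).symm, card_ofList]

theorem foldl_ite_count (P : Int → Prop) [DecidablePred P] (l : List Int) (a : Int) :
    l.foldl (fun acc x => if P x then acc + 1 else acc) a
      = a + (l.countP (fun x => decide (P x)) : Int) := by
  induction l generalizing a with
  | nil => simp
  | cons x xs ih =>
    simp only [List.foldl_cons, List.countP_cons, ih]
    by_cases h : P x
    · simp [h]; ring
    · simp [h]

theorem idxEval (t : List Int) (k : Nat) (hk : k < t.length - 1) :
    (PySem.List.pyGetD
        (List.map (fun i => ((List.foldl PySem.Set.add (PySem.Set.empty : PySem.Set Int) (List.take (i + 1) t)).length : Int))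
          (List.range t.length)) ((0 : Int) + (k : Nat)) 0
      = PySem.List.pyGetD
        ((List.map (fun i => ((List.foldl PySem.Set.add (PySem.Set.empty : PySem.Set Int) (List.take (i + 1) t.reverse)).length : Int))
          (List.range t.length)).reverse) ((0 : Int) + (k : Nat) + 1) 0)
    ↔ ((t.take (k+1)).toFinset.card = (t.drop (k+1)).toFinset.card) := by
  have hn2 : 2 ≤ t.length := by omega
  rw [zero_add, show ((k : Nat) : Int) + 1 = (((k+1) : Nat) : Int) from by push_cast; ring]
  rw [PySem.List.pyGetD_natCast, PySem.List.pyGetD_natCast]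
  rw [List.getD_eq_getElem _ _ (by simp; omega), List.getD_eq_getElem _ _ (by simp; omega)]
  rw [List.getElem_reverse]
  simp only [List.getElem_map, List.getElem_range, List.length_map, List.length_range]
  rw [show t.length - 1 - (k + 1) + 1 = t.length - (k + 1) from by omega]
  rw [List.take_reverse]
  rw [show t.length - (t.length - (k + 1)) = k + 1 from by omega]
  rw [card_foldl_add, card_foldl_add, List.toFinset_reverse]
  exact Nat.cast_inj

-- A computes: over every cut position k+1 (k < n-1), compare the prefix and suffix distinct counts.
theorem solA (t : List Int) :
    solution t
      = ((List.range (t.length - 1)).countP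
          (fun k => decide ((t.take (k+1)).toFinset.card = (t.drop (k+1)).toFinset.card)) : Int) := by
  simp only [solution]
  rw [PySem.List.slice?_none_none_neg_one]
  simp only [Option.getD_some]
  rw [loopA, loopA]
  simp only [List.nil_append]
  rw [PySem.List.slice?_none_none_neg_one]
  simp only [Option.getD_some, List.length_map, List.length_range, List.length_reverse]
  rw [foldl_ite_count
    (fun index => PySem.List.pyGetD
        (List.map (fun i => ((List.foldl PySem.Set.add (PySem.Set.empty : PySem.Set Int) (List.take (i + 1) t)).length : Int))
          (List.range t.length)) index 0
      = PySem.List.pyGetD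
        ((List.map (fun i => ((List.foldl PySem.Set.add (PySem.Set.empty : PySem.Set Int) (List.take (i + 1) t.reverse)).length : Int))
          (List.range t.length)).reverse) (index + 1) 0)
    (PySem.List.pyRange 0 ((t.length : Int) - 1) 1) 0]
  rw [zero_add, PySem.List.pyRange_one, List.countP_map]
  rw [show ((t.length : Int) - 1 - 0).toNat = t.length - 1 from by omega]
  refine congrArg Nat.cast (List.countP_congr ?_)
  intro k hk
  have hkm : k < t.length - 1 := List.mem_range.1 hk
  simp only [Function.comp_def, decide_eq_true_eq]
  rw [idxEval t k hkm]

-- B's loop specification -------------------------------------------------------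

def gB (pre xs : List Int) : Nat :=
  (List.range xs.length).countP
    (fun i => decide (xs.drop (i+1) ≠ [] ∧
      (pre ++ xs.take (i+1)).toFinset.card = (xs.drop (i+1)).toFinset.card))

-- The dict d is an exact positive-count frequency table of the list l.
def GoodC (d : PySem.Dict Int Int) (l : List Int) : Prop :=
  d.keys.Nodup ∧ ∀ k, d.get? k = if 0 < l.count k then some (l.count k : Int) else none

theorem size_goodC (d : PySem.Dict Int Int) (l : List Int) (h : GoodC d l) :
    d.size = l.toFinset.card := by
  have hk : ∀ k, k ∈ d.keys ↔ k ∈ l := by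
    intro k
    have hc := PySem.Dict.contains_eq_isSome_get? d k
    rw [h.2 k] at hc
    constructor
    · intro hm
      have : d.contains k = true := (PySem.Dict.contains_iff_mem_keys d k).2 hm
      rw [hc] at this
      by_cases h0 : 0 < l.count k
      · exact List.count_pos_iff.1 h0
      · simp [h0] at this
    · intro hm
      have h0 : 0 < l.count k := List.count_pos_iff.2 hm
      have : d.contains k = true := by rw [hc]; simp [h0]
      exact (PySem.Dict.contains_iff_mem_keys d k).1 this
  have h1 : d.keys.toFinset = l.toFinset := by ext a; simp [List.mem_toFinset, hk]
  have h2 : d.size = d.keys.length := by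
    simp [PySem.Dict.size, PySem.Dict.keys]
  rw [h2, ← List.toFinset_card_of_nodup h.1, h1]

theorem find?_filter_ne (rest : List (Int × Int)) (x k : Int) :
    List.find? (fun p => p.1 == k) (rest.filter (fun p => !p.1 == x)) =
      if k = x then none else List.find? (fun p => p.1 == k) rest := by
  induction rest with
  | nil => simp
  | cons p rest ih =>
    by_cases hx : p.1 = x
    · rw [List.filter_cons_of_neg (by simp [hx])]
      by_cases hk : k = x
      · simp [hk]
      · rw [List.find?_cons_of_neg (by simp [hx]; exact fun h => hk h.symm), ih, if_neg hk]
    · rw [List.filter_cons_of_pos (by simp [hx])]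
      by_cases hpk : p.1 = k
      · have hk : ¬ k = x := fun h => hx (by rw [hpk, h])
        rw [List.find?_cons_of_pos (by simp [hpk]), List.find?_cons_of_pos (by simp [hpk]), if_neg hk]
      · rw [List.find?_cons_of_neg (by simp [hpk]), List.find?_cons_of_neg (by simp [hpk]), ih]

theorem get?_erase_dict (d : PySem.Dict Int Int) (x k : Int) :
    (d.erase x).get? k = if k = x then none else d.get? k := by
  obtain ⟨items⟩ := d
  rw [show (PySem.Dict.mk items).erase x = PySem.Dict.mk (items.filter (fun p => !p.1 == x)) from rfl]
  rw [show ∀ l, (PySem.Dict.mk l).get? k = Option.map (fun q => q.2) (List.find? (fun p => p.1 == k) l) from fun _ => rfl,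
      show ∀ l, (PySem.Dict.mk l).get? k = Option.map (fun q => q.2) (List.find? (fun p => p.1 == k) l) from fun _ => rfl]
  rw [find?_filter_ne]
  split
  · simp
  · simp

theorem nodup_keys_erase_dict (d : PySem.Dict Int Int) (x : Int) (h : d.keys.Nodup) :
    (d.erase x).keys.Nodup := by
  have hs : ((d.items.filter (fun p => !p.1 == x)).map Prod.fst).Sublist (d.items.map Prod.fst) :=
    List.Sublist.map Prod.fst List.filter_sublist
  have : (d.erase x).keys = (d.items.filter (fun p => !p.1 == x)).map Prod.fst := by
    simp [PySem.Dict.erase, PySem.Dict.keys]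
  rw [this]
  exact h.sublist (by simpa [PySem.Dict.keys] using hs)

theorem goodC_counter (t : List Int) : GoodC (PySem.Dict.counter t) t := by
  refine ⟨PySem.Dict.nodup_keys_counter t, fun k => ?_⟩
  have hc := PySem.Dict.contains_counter t k
  rw [PySem.Dict.contains_eq_isSome_get?] at hc
  have hg := PySem.Dict.getD_counter t k
  by_cases hm : k ∈ t
  · have h0 : 0 < t.count k := List.count_pos_iff.2 hm
    have : ((PySem.Dict.counter t).get? k).isSome = true := by
      rw [hc]; simpa using hm
    obtain ⟨v, hv⟩ := Option.isSome_iff_exists.1 this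
    have : v = (t.count k : Int) := by
      have := hg; rw [PySem.Dict.getD, hv] at this; simpa using this
    simp [hv, this, h0]
  · have h0 : t.count k = 0 := List.count_eq_zero.2 hm
    have : ((PySem.Dict.counter t).get? k).isSome = false := by
      simp [hc, hm]
    have hn : (PySem.Dict.counter t).get? k = none := by
      cases hh : (PySem.Dict.counter t).get? k <;> simp_all
    simp [hn, h0]

theorem goodC_step (d : PySem.Dict Int Int) (x : Int) (xs : List Int)
    (h : GoodC d (x :: xs)) :
    GoodC (if d.getD x 0 - 1 = 0 then d.erase x else d.insert x (d.getD x 0 - 1)) xs := by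
  have hx : d.get? x = some (((x :: xs).count x : Int)) := by
    rw [h.2 x]; simp [List.count_cons_self]
  have hgd : d.getD x 0 = ((x :: xs).count x : Int) := by
    rw [PySem.Dict.getD, hx]; rfl
  have hc1 : d.getD x 0 - 1 = (xs.count x : Int) := by
    rw [hgd, List.count_cons_self]; push_cast; ring
  by_cases hz : d.getD x 0 - 1 = 0
  · have hzc : xs.count x = 0 := by
      have := hc1 ▸ hz; exact_mod_cast this
    rw [if_pos hz]
    refine ⟨nodup_keys_erase_dict d x h.1, fun k => ?_⟩
    rw [get?_erase_dict]
    by_cases hk : k = x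
    · subst hk; simp [hzc]
    · rw [if_neg hk, h.2 k]; simp [show ¬ x = k from fun h => hk h.symm]
  · have hzc : 0 < xs.count x := by
      rcases Nat.eq_zero_or_pos (xs.count x) with h0 | h0
      · exact absurd (by rw [hc1, h0]; rfl) hz
      · exact h0
    rw [if_neg hz]
    refine ⟨PySem.Dict.nodup_keys_insert d x _ h.1, fun k => ?_⟩
    by_cases hk : k = x
    · subst hk
      rw [PySem.Dict.get?_insert_self, hc1, if_pos hzc]
    · rw [PySem.Dict.get?_insert_of_ne d _ hk, h.2 k]; simp [show ¬ x = k from fun h => hk h.symm]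

theorem ofList_append_singleton (pre : List Int) (x : Int) :
    PySem.Set.ofList (pre ++ [x]) = PySem.Set.add (PySem.Set.ofList pre) x := by
  simp [PySem.Set.ofList_eq_foldl, List.foldl_append]

theorem loopB (xs : List Int) (pre : List Int) (d : PySem.Dict Int Int) (ans : Int)
    (hd : GoodC d xs) :
    (xs.foldl
      (fun (st : PySem.Set Int × PySem.Dict Int Int × Int × Int) x =>
        let rem := st.2.2.2 - 1
        let left := PySem.Set.add st.1 x
        let c := st.2.1.getD x 0 - 1
        let right := if c = 0 then st.2.1.erase x else st.2.1.insert x c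
        let ans := if 0 < rem ∧ PySem.Set.len left = (right.size : Int) then st.2.2.1 + 1 else st.2.2.1
        (left, right, ans, rem))
      (PySem.Set.ofList pre, d, ans, (xs.length : Int))).2.2.1
    = ans + (gB pre xs : Int) := by
  induction xs generalizing pre d ans with
  | nil => simp [gB]
  | cons x xs ih =>
    simp only [List.foldl_cons]
    have hrem : ((x :: xs).length : Int) - 1 = (xs.length : Int) := by
      simp
    have hleft : PySem.Set.add (PySem.Set.ofList pre) x = PySem.Set.ofList (pre ++ [x]) :=
      (ofList_append_singleton pre x).symm
    have hd' : GoodC (if d.getD x 0 - 1 = 0 then d.erase x else d.insert x (d.getD x 0 - 1)) xs :=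
      goodC_step d x xs hd
    have hcond : (0 < ((xs.length : Nat) : Int) ∧
        PySem.Set.len (PySem.Set.ofList (pre ++ [x]))
          = (((if d.getD x 0 - 1 = 0 then d.erase x else d.insert x (d.getD x 0 - 1)).size : Nat) : Int))
        ↔ (xs ≠ [] ∧ (pre ++ [x]).toFinset.card = xs.toFinset.card) := by
      rw [size_goodC _ _ hd']
      constructor
      · rintro ⟨h1, h2⟩
        have hne : xs ≠ [] := by
          cases xs with
          | nil => simp at h1
          | cons a l => simp
        refine ⟨hne, ?_⟩
        simp only [PySem.Set.len, card_ofList] at h2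
        exact_mod_cast h2
      · rintro ⟨h1, h2⟩
        refine ⟨?_, ?_⟩
        · cases xs with
          | nil => exact absurd rfl h1
          | cons a l => simp
        · simp only [PySem.Set.len, card_ofList]
          exact_mod_cast h2
    have hstep : ((PySem.Set.ofList pre).add x,
        (if d.getD x 0 - 1 = 0 then d.erase x else d.insert x (d.getD x 0 - 1)),
        (if 0 < ((x :: xs).length : Int) - 1 ∧
            ((PySem.Set.ofList pre).add x).len
              = (((if d.getD x 0 - 1 = 0 then d.erase x else d.insert x (d.getD x 0 - 1)).size : Nat) : Int)
          then ans + 1 else ans),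
        ((x :: xs).length : Int) - 1)
      = (PySem.Set.ofList (pre ++ [x]),
         (if d.getD x 0 - 1 = 0 then d.erase x else d.insert x (d.getD x 0 - 1)),
         (if xs ≠ [] ∧ (pre ++ [x]).toFinset.card = xs.toFinset.card then ans + 1 else ans),
         (xs.length : Int)) := by
      rw [hrem, hleft, if_congr hcond rfl rfl]
    rw [hstep, ih (pre ++ [x]) _ _ hd']
    have hg : gB pre (x :: xs)
        = (if xs ≠ [] ∧ (pre ++ [x]).toFinset.card = xs.toFinset.card then 1 else 0)
          + gB (pre ++ [x]) xs := by
      simp only [gB, List.length_cons, List.range_succ_eq_map, List.countP_cons, List.countP_map]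
      rw [Nat.add_comm]
      congr 1
      all_goals first
        | (apply List.countP_congr
           intro i _
           simp [Nat.succ_eq_add_one, List.take_succ_cons,
             List.drop_succ_cons, List.append_assoc])
        | simp [List.take_succ_cons, List.drop_succ_cons]
    rw [hg]
    split_ifs <;> push_cast <;> ring

theorem solB (t : List Int) : solution_alt t = (gB [] t : Int) := by
  unfold solution_alt
  rw [PySem.Dict.foldl_insert_getD_add_one_eq_counter]
  have h := loopB t [] (PySem.Dict.counter t) 0 (goodC_counter t)
  simpa using h

theorem bridge (t : List Int) :
    (gB [] t : Int)
      = ((List.range (t.length - 1)).countP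
          (fun k => decide ((t.take (k+1)).toFinset.card = (t.drop (k+1)).toFinset.card)) : Int) := by
  unfold gB
  simp only [List.nil_append]
  cases hn : t.length with
  | zero => simp
  | succ m =>
    rw [List.range_succ, List.countP_append, Nat.succ_sub_one]
    have hm : t.drop (m+1) = [] := by
      rw [← hn]; exact List.drop_length
    rw [(List.countP_eq_zero (l := [m])).2 ?z, Nat.add_zero]
    case z =>
      intro a ha
      simp only [List.mem_singleton] at ha
      subst ha
      simp [hm]
    norm_cast
    apply List.countP_congr
    intro i hi
    have him : i < m := List.mem_range.1 hi
    have hne : t.drop (i+1) ≠ [] := by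
      apply List.ne_nil_of_length_pos
      rw [List.length_drop, hn]
      omega
    simp [hne]

-- ===== VERDICT (by name: the statement is the Claim_ definition above) =====
theorem solution_spec : Claim_equal_solution := by
  intro t _
  unfold Spec_solution
  rw [solA, solB, bridge]
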